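-- pv_equiv track=rewrite | github.com/chuck-gcc/la-pleiade | atlas/TheRock/base/amdsmi/amdsmi_cli/amdsmi_helpers.py | get_bitmask_ranges
-- ===== SOURCE A (Python) =====
-- def get_bitmask_ranges(bitmask_dict):
--     ranges = {}
--     #start index of the first bitmask
--     current_start = 0
--
--     for cpu, bitmask in bitmask_dict.items():
--         # Convert the bitmask to a binary string
--         binary_str = bin(int(bitmask, 16))[2:].zfill(64)
--
--         binary_str = binary_str[::-1]
--         start = 0
--         end = len(binary_str) - 1
--         # Find the range of set bits
--         start_b = binary_str.find('1')
--         end_b = binary_str.rfind('1')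
--
--         start_setbit = start_b + current_start
--         end_setbit = end_b + current_start
--
--         # Calculate the actual bit positions
--         end_bit = current_start + end
--
--         # Update the start index for the next bitmask
--         current_start = end_bit + 1
--
--         # Store the range in the dictionary
--         if start_b == -1 and end_b == -1:
--             ranges[cpu] = "N/A"
--         else:
--             ranges[cpu] = f"{start_setbit}-{end_setbit}"
--
--     return ranges
-- ===== SOURCE B (Python) =====
-- def get_bitmask_ranges(bitmask_dict):
--     ranges = {}
--     base = 0
--     for cpu, bitmask in bitmask_dict.items():
--         n = int(bitmask, 16)
--         if n == 0:
--             ranges[cpu] = "N/A"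
--         else:
--             low = (n & -n).bit_length() - 1
--             high = n.bit_length() - 1
--             ranges[cpu] = f"{low + base}-{high + base}"
--         base += max(n.bit_length(), 64)
--     return ranges
-- ===== Notes on version B (the rewrite author's own statement) =====
-- stated objective: faster
-- what changed: Replaces the whole binary-string machinery (bin/zfill/reverse/find/rfind) with integer bit arithmetic: lowest set bit via (n & -n).bit_length()-1, highest via n.bit_length()-1, and the running offset advanced by max(n.bit_length(), 64).
-- outside the precondition, e.g. on get_bitmask_ranges({'c': 'zz'}): A raises ValueError, B raises ValueError
import Mathlib
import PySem

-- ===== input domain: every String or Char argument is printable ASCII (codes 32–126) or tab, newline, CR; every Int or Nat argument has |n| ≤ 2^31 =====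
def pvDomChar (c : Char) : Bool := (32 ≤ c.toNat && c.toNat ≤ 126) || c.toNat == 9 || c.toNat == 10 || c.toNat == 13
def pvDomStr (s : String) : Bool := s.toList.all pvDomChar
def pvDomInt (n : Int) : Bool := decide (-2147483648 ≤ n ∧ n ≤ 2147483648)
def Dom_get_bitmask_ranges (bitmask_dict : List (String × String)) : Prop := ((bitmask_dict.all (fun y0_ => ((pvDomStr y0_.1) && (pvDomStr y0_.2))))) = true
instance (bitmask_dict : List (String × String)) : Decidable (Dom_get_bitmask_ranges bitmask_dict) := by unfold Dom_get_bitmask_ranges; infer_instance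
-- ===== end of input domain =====

-- B replaces A's binary-string machinery (bin/zfill/reverse/find/rfind) by integer bit arithmetic
-- (lowest set bit via n & -n, highest via bit_length); same single pass over the dict, same results.


-- ===== PORT A =====
-- loop body of A (the Python for-loop over bitmask_dict.items(); state = (ranges, current_start)).
-- int(bitmask, 16) is PySem.Int.ofStrBase?; the `none` branch (Python: ValueError) is excluded by Pre_.
def gbrStepA (st : PySem.Dict String String × Int) (p : String × String) :
    PySem.Dict String String × Int :=
  match PySem.Int.ofStrBase? p.2 16 with
  | none => st
  | some n =>
    -- binary_str = bin(int(bitmask,16))[2:].zfill(64) ; binary_str = binary_str[::-1]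
    -- (s[::-1] is List.reverse, cf. PySem.Chars.slice?_none_none_neg_one)
    let binary_str := (PySem.Chars.zfill ((PySem.Int.toBinChars0b n).drop 2) 64).reverse
    let endv : Int := PySem.Chars.len binary_str - 1
    let start_b := PySem.Chars.find binary_str ['1']
    let end_b := PySem.Chars.rfind binary_str ['1']
    let start_setbit := start_b + st.2
    let end_setbit := end_b + st.2
    let end_bit := st.2 + endv
    let current_start' := end_bit + 1
    if start_b = -1 ∧ end_b = -1 then
      (st.1.insert p.1 "N/A", current_start')
    else
      (st.1.insert p.1
        (String.ofList (PySem.Int.toChars start_setbit ++ '-' :: PySem.Int.toChars end_setbit)),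
        current_start')

def get_bitmask_ranges (bitmask_dict : List (String × String)) : List (String × String) :=
  (((PySem.Dict.ofList bitmask_dict).items).foldl gbrStepA (PySem.Dict.empty, 0)).1.items

-- ===== PORT B =====
-- loop body of B: n = int(bitmask,16); low = (n & -n).bit_length()-1; high = n.bit_length()-1.
def gbrStepB (st : PySem.Dict String String × Int) (p : String × String) :
    PySem.Dict String String × Int :=
  match PySem.Int.ofStrBase? p.2 16 with
  | none => st
  | some n =>
    let bl : Int := (PySem.Int.bitLength n : Int)
    let ranges' :=
      if n = 0 then st.1.insert p.1 "N/A"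
      else
        let low : Int := (PySem.Int.bitLength (PySem.Int.band n (-n)) : Int) - 1
        let high : Int := bl - 1
        st.1.insert p.1
          (String.ofList (PySem.Int.toChars (low + st.2) ++ '-' :: PySem.Int.toChars (high + st.2)))
    (ranges', st.2 + max bl 64)

def get_bitmask_ranges_alt (bitmask_dict : List (String × String)) : List (String × String) :=
  (((PySem.Dict.ofList bitmask_dict).items).foldl gbrStepB (PySem.Dict.empty, 0)).1.items

-- ===== PRECONDITION & SPEC =====
-- Pre_ excludes values of the dict that int(v, 16) rejects (Python raises ValueError there) and
-- values parsing to a NEGATIVE integer: there A's bin(n)[2:] slices into the sign, so the '-' sign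
-- character is counted by zfill(64)'s padding width — an accident of the string representation
-- that shifts later offsets for negatives wider than 63 bits (see cites).
def Pre_get_bitmask_ranges (bitmask_dict : List (String × String)) : Prop :=
  ∀ p ∈ (PySem.Dict.ofList bitmask_dict).items, 0 ≤ (PySem.Int.ofStrBase? p.2 16).getD (-1)
instance (bitmask_dict : List (String × String)) : Decidable (Pre_get_bitmask_ranges bitmask_dict) := by
  unfold Pre_get_bitmask_ranges; infer_instance

def pvWitness_get_bitmask_ranges : (List (String × String)) := [("cpu0", "ff"), ("cpu1", "0")]

def Spec_get_bitmask_ranges (bitmask_dict : List (String × String)) (out : List (String × String)) : Prop := out = get_bitmask_ranges_alt bitmask_dict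
instance (bitmask_dict : List (String × String)) (out : List (String × String)) : Decidable (Spec_get_bitmask_ranges bitmask_dict out) := by unfold Spec_get_bitmask_ranges; infer_instance

-- ===== CLAIM (what is proved, stated in full; the proofs are below) =====
def Claim_equal_get_bitmask_ranges : Prop := ∀ (bitmask_dict : List (String × String)), Dom_get_bitmask_ranges bitmask_dict → Pre_get_bitmask_ranges bitmask_dict → Spec_get_bitmask_ranges bitmask_dict (get_bitmask_ranges bitmask_dict)

-- ===== LEMMAS AND PROOFS =====

-- little-endian binary digits of m ('1'/'0' chars); lbits 0 = []
def lbits : Nat → List Char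
  | 0 => []
  | m + 1 => (if (m + 1) % 2 = 1 then '1' else '0') :: lbits ((m + 1) / 2)
decreasing_by exact Nat.div_lt_self (Nat.succ_pos _) one_lt_two

-- number of trailing zero bits of m (0 for m = 0)
def tzN : Nat → Nat
  | 0 => 0
  | m + 1 => if (m + 1) % 2 = 1 then 0 else tzN ((m + 1) / 2) + 1
decreasing_by exact Nat.div_lt_self (Nat.succ_pos _) one_lt_two

-- big-endian digit string that bin(m)[2:] produces
def bigits (m : Nat) : List Char := if m = 0 then ['0'] else (lbits m).reverse

theorem lbits_pos (m : Nat) (hm : 0 < m) :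
    lbits m = (if m % 2 = 1 then '1' else '0') :: lbits (m / 2) := by
  cases m with
  | zero => omega
  | succ k => rw [lbits]

theorem tzN_pos (m : Nat) (hm : 0 < m) :
    tzN m = if m % 2 = 1 then 0 else tzN (m / 2) + 1 := by
  cases m with
  | zero => omega
  | succ k => rw [tzN]

theorem toDigitsCore_eq (f : Nat) : ∀ n acc, n < f →
    Nat.toDigitsCore 2 f n acc = bigits n ++ acc := by
  induction f with
  | zero => intro n acc h; omega
  | succ f ih =>
    intro n acc h
    rw [Nat.toDigitsCore]
    by_cases h2 : n / 2 = 0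
    · have : n = 0 ∨ n = 1 := by omega
      rcases this with rfl | rfl <;> simp [bigits, lbits] <;> rfl
    · simp only [h2]
      rw [ih _ _ (by omega)]
      have hn : 0 < n := by omega
      have : bigits n = bigits (n / 2) ++ [Nat.digitChar (n % 2)] := by
        unfold bigits
        rw [if_neg (by omega), if_neg h2, lbits_pos n hn, List.reverse_cons]
        congr 1
        rcases Nat.mod_two_eq_zero_or_one n with h0 | h0 <;> simp [h0, Nat.digitChar]
      simp [this]

theorem toDigits_eq (m : Nat) : Nat.toDigits 2 m = bigits m :=
  toDigitsCore_eq (m + 1) m [] (by omega) |>.trans (by simp)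

theorem len_lbits (m : Nat) : (lbits m).length = PySem.Int.bitLength (m : Int) := by
  induction m using Nat.strong_induction_on with
  | _ m ih =>
    cases m with
    | zero => simp [lbits, PySem.Int.bitLength_zero]
    | succ k =>
      rw [lbits_pos _ (Nat.succ_pos k), PySem.Int.bitLength_natCast (Nat.succ_pos k)]
      simp [ih ((k+1)/2) (Nat.div_lt_self (Nat.succ_pos _) one_lt_two)]

theorem lbits_ne_nil (m : Nat) (hm : 0 < m) : lbits m ≠ [] := by
  rw [lbits_pos m hm]; simp

theorem lbits_getLast? (m : Nat) (hm : 0 < m) : (lbits m).getLast? = some '1' := by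
  induction m using Nat.strong_induction_on with
  | _ m ih =>
    rw [lbits_pos m hm]
    by_cases h2 : m / 2 = 0
    · have h1 : m = 1 := by omega
      subst h1; simp [lbits]
    · have hne := lbits_ne_nil (m / 2) (by omega)
      cases hlb : lbits (m / 2) with
      | nil => exact absurd hlb hne
      | cons a t =>
        have := ih (m / 2) (Nat.div_lt_self hm one_lt_two) (by omega)
        rw [hlb] at this
        simpa using this

theorem mem_lbits (m : Nat) : ∀ c ∈ lbits m, c = '0' ∨ c = '1' := by
  induction m using Nat.strong_induction_on with
  | _ m ih =>
    cases m with
    | zero => simp [lbits]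
    | succ k =>
      rw [lbits_pos _ (Nat.succ_pos k)]
      intro c hc
      rcases List.mem_cons.mp hc with rfl | hc
      · split <;> simp
      · exact ih ((k+1)/2) (Nat.div_lt_self (Nat.succ_pos _) one_lt_two) c hc

theorem mem_bigits (m : Nat) : ∀ c ∈ bigits m, c = '0' ∨ c = '1' := by
  unfold bigits
  split
  · simp
  · intro c hc
    exact mem_lbits m c (List.mem_reverse.mp hc)

theorem bigits_ne_nil (m : Nat) : bigits m ≠ [] := by
  unfold bigits
  split
  · simp
  · simpa using lbits_ne_nil m (by omega)

theorem zfill64_eq (cs : List Char) (h : ∀ c ∈ cs, c = '0' ∨ c = '1') (hne : cs ≠ []) :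
    PySem.Chars.zfill cs 64 = List.replicate (64 - cs.length) '0' ++ cs := by
  unfold PySem.Chars.zfill
  by_cases hle : (64 : Int) ≤ (cs.length : Int)
  · rw [if_pos hle]
    have : 64 - cs.length = 0 := by omega
    simp [this]
  · rw [if_neg hle]
    cases cs with
    | nil => simp at hne
    | cons c rest =>
      have hc := h c (by simp)
      have : ¬ (c = '+' ∨ c = '-') := by rcases hc with rfl | rfl <;> decide
      simp only [this]
      simp

theorem find_go_zeros (j k : Nat) : PySem.Chars.find.go ['1'] (List.replicate j '0') k = -1 := by
  induction j generalizing k with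
  | zero => simp [PySem.Chars.find.go]
  | succ j ih => simpa [List.replicate_succ, PySem.Chars.find.go, List.isPrefixOf] using ih (k+1)

theorem find_go_lbits (m : Nat) (hm : 0 < m) (j k : Nat) :
    PySem.Chars.find.go ['1'] (lbits m ++ List.replicate j '0') k = (k : Int) + (tzN m : Int) := by
  induction m using Nat.strong_induction_on generalizing k with
  | _ m ih =>
    rw [lbits_pos m hm, tzN_pos m hm]
    rcases Nat.mod_two_eq_zero_or_one m with h0 | h0
    · have h2 : 0 < m / 2 := by omega
      simp only [h0]
      norm_num
      rw [PySem.Chars.find.go]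
      simp only [List.isPrefixOf]
      norm_num
      rw [ih (m / 2) (Nat.div_lt_self hm one_lt_two) h2 (k + 1)]
      push_cast; ring
    · simp only [h0]
      norm_num
      rw [PySem.Chars.find.go]
      simp [List.isPrefixOf]

theorem one_isPrefixOf_iff (l : List Char) : ['1'].isPrefixOf l = true ↔ l[0]? = some '1' := by
  rw [List.isPrefixOf_iff_prefix]
  cases l <;> simp [eq_comm]

theorem rfind_go_none (s : List Char) (hz : ∀ i : Nat, s[i]? ≠ some '1') (j : Nat) :
    PySem.Chars.rfind.go s ['1'] j = -1 := by
  induction j with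
  | zero =>
    rw [PySem.Chars.rfind.go]
    have : ¬ (['1'].isPrefixOf s = true) := by rw [one_isPrefixOf_iff]; exact hz 0
    simp [this]
  | succ j ih =>
    rw [PySem.Chars.rfind.go]
    have : ¬ (['1'].isPrefixOf (s.drop (j+1)) = true) := by
      rw [one_isPrefixOf_iff]
      rw [List.getElem?_drop]
      simpa using hz (j + 1)
    simp only [this]
    exact ih

theorem rfind_go_eq (s : List Char) (h : Nat) (hs : s[h]? = some '1')
    (hz : ∀ i : Nat, h < i → s[i]? ≠ some '1') :
    ∀ j : Nat, h ≤ j → PySem.Chars.rfind.go s ['1'] j = (h : Int) := by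
  intro j
  induction j with
  | zero =>
    intro hj
    have h0 : h = 0 := by omega
    subst h0
    rw [PySem.Chars.rfind.go]
    have : ['1'].isPrefixOf s = true := (one_isPrefixOf_iff s).mpr hs
    simp [this]
  | succ j ih =>
    intro hj
    rw [PySem.Chars.rfind.go]
    by_cases he : h = j + 1
    · rw [he] at hs
      have hpre : ['1'].isPrefixOf (s.drop (j+1)) = true := by
        rw [one_isPrefixOf_iff, List.getElem?_drop]
        simpa using hs
      simp [hpre, he]
    · have hlt : h ≤ j := by omega
      have : ¬ (['1'].isPrefixOf (s.drop (j+1)) = true) := by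
        rw [one_isPrefixOf_iff, List.getElem?_drop]
        simpa using hz (j + 1) (by omega)
      simp only [this]
      exact ih hlt

-- clearing the lowest set bit: m - (m &&& (m-1)) = 2 ^ (trailing zeros)
theorem sub_and_pred (m : Nat) (hm : 0 < m) : m - (m &&& (m - 1)) = 2 ^ tzN m := by
  induction m using Nat.strong_induction_on with
  | _ m ih =>
    rw [tzN_pos m hm]
    set q := m / 2 with hq
    rcases Nat.mod_two_eq_zero_or_one m with h0 | h0
    · have h2 : 0 < q := by omega
      have hb2 : m - 1 = Nat.bit true (q - 1) := by simp [Nat.bit]; omega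
      have hb1 : m = Nat.bit false q := by simp [Nat.bit]; omega
      have hand : m &&& (m - 1) = Nat.bit false (q &&& (q - 1)) := by
        rw [hb2]; conv_lhs => rw [hb1]
        rw [Nat.land_bit]; simp
      have hle : q &&& (q - 1) ≤ q := Nat.and_le_left
      have hih := ih q (by omega) h2
      simp only [h0]
      norm_num
      rw [hand]
      simp only [Nat.bit, Bool.cond_false]
      rw [pow_succ]
      omega
    · have hb2 : m - 1 = Nat.bit false q := by simp [Nat.bit]; omega
      have hb1 : m = Nat.bit true q := by simp [Nat.bit]; omega
      have hand : m &&& (m - 1) = Nat.bit false (q &&& q) := by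
        rw [hb2]; conv_lhs => rw [hb1]
        rw [Nat.land_bit]; simp
      simp only [h0]
      norm_num
      rw [hand]
      simp only [Nat.and_self, Nat.bit, Bool.cond_false]
      omega

theorem bitLength_two_pow (t : Nat) : PySem.Int.bitLength ((2 ^ t : Nat) : Int) = t + 1 := by
  induction t with
  | zero => decide
  | succ t ih =>
    rw [PySem.Int.bitLength_natCast (Nat.two_pow_pos (t+1))]
    have : 2 ^ (t + 1) / 2 = 2 ^ t := by omega
    rw [this, ih]

theorem band_pos_neg (m : Nat) (hm : 0 < m) :
    PySem.Int.band (m : Int) (-(m : Int)) = ((2 ^ tzN m : Nat) : Int) := by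
  unfold PySem.Int.band
  rw [if_pos (by positivity), if_neg (by omega)]
  have h1 : ((m : Int)).toNat = m := by omega
  have h2 : (-(-(m : Int)) - 1).toNat = m - 1 := by omega
  rw [h1, h2, sub_and_pred m hm]

theorem step_eq (st : PySem.Dict String String × Int) (p : String × String)
    (h : 0 ≤ (PySem.Int.ofStrBase? p.2 16).getD (-1)) : gbrStepA st p = gbrStepB st p := by
  cases heq : PySem.Int.ofStrBase? p.2 16 with
  | none => rw [heq] at h; simp at h
  | some n =>
    rw [heq] at h
    simp only [Option.getD_some] at h
    obtain ⟨m, rfl⟩ : ∃ m : Nat, n = (m : Int) := ⟨n.toNat, (Int.toNat_of_nonneg h).symm⟩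
    simp only [gbrStepA, gbrStepB, heq]
    have hD : (PySem.Int.toBinChars0b (m : Int)).drop 2 = bigits m := by
      unfold PySem.Int.toBinChars0b
      rw [if_neg (by omega)]
      simp [toDigits_eq]
    have hZ : PySem.Chars.zfill ((PySem.Int.toBinChars0b (m : Int)).drop 2) 64
        = List.replicate (64 - (bigits m).length) '0' ++ bigits m := by
      rw [hD]; exact zfill64_eq _ (mem_bigits m) (bigits_ne_nil m)
    by_cases hm : m = 0
    · subst hm
      have hrev : (PySem.Chars.zfill ((PySem.Int.toBinChars0b ((0:Nat) : Int)).drop 2) 64).reverse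
          = List.replicate 64 '0' := by
        rw [hZ]
        simp [bigits, List.replicate_succ]
      rw [hrev]
      have hfind : PySem.Chars.find (List.replicate 64 '0') ['1'] = -1 := by
        unfold PySem.Chars.find
        exact find_go_zeros 64 0
      have hz : ∀ i : Nat, (List.replicate 64 '0')[i]? ≠ some '1' := by
        intro i
        rw [List.getElem?_replicate]
        split <;> simp
      have hrfind : PySem.Chars.rfind (List.replicate 64 '0') ['1'] = -1 := by
        unfold PySem.Chars.rfind
        exact rfind_go_none _ hz _
      rw [hfind, hrfind]
      rw [if_pos ⟨rfl, rfl⟩]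
      simp only [Prod.mk.injEq]
      simp [PySem.Chars.len_eq, PySem.Int.bitLength_zero]
      omega
    · have hmpos : 0 < m := by omega
      have hlb : (bigits m).reverse = lbits m := by
        unfold bigits; rw [if_neg hm, List.reverse_reverse]
      set L := (lbits m).length with hL
      have hL1 : 0 < L := List.length_pos_of_ne_nil (lbits_ne_nil m hmpos)
      have hrev : (PySem.Chars.zfill ((PySem.Int.toBinChars0b ((m:Nat) : Int)).drop 2) 64).reverse
          = lbits m ++ List.replicate (64 - L) '0' := by
        rw [hZ, List.reverse_append, List.reverse_replicate, hlb]
        unfold bigits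
        rw [if_neg hm]
        simp
        omega
      rw [hrev]
      have hfind : PySem.Chars.find (lbits m ++ List.replicate (64 - L) '0') ['1']
          = (tzN m : Int) := by
        unfold PySem.Chars.find
        rw [find_go_lbits m hmpos (64 - L) 0]
        simp
      have hs : (lbits m ++ List.replicate (64 - L) '0')[L - 1]? = some '1' := by
        rw [List.getElem?_append_left (by omega)]
        rw [← List.getLast?_eq_getElem?]
        exact lbits_getLast? m hmpos
      have hz : ∀ i : Nat, L - 1 < i → (lbits m ++ List.replicate (64 - L) '0')[i]? ≠ some '1' := by
        intro i hi
        by_cases hiL : i < L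
        · omega
        · rw [List.getElem?_append_right (by omega)]
          rw [List.getElem?_replicate]
          split <;> simp
      have hrfind : PySem.Chars.rfind (lbits m ++ List.replicate (64 - L) '0') ['1']
          = ((L - 1 : Nat) : Int) := by
        unfold PySem.Chars.rfind
        exact rfind_go_eq _ (L - 1) hs hz _ (by simp; omega)
      rw [hfind, hrfind]
      have hcond : ¬ ((tzN m : Int) = -1 ∧ ((L - 1 : Nat) : Int) = -1) := by
        rintro ⟨h1, -⟩; omega
      rw [if_neg hcond, if_neg (by exact_mod_cast hm : ¬ ((m:Nat):Int) = 0)]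
      have hlow : (PySem.Int.bitLength (PySem.Int.band ((m:Nat):Int) (-((m:Nat):Int))) : Int) - 1
          = (tzN m : Int) := by
        rw [band_pos_neg m hmpos, bitLength_two_pow]
        push_cast; ring
      have hhigh : ((PySem.Int.bitLength ((m:Nat):Int) : Int)) - 1 = ((L - 1 : Nat) : Int) := by
        rw [← len_lbits m, ← hL]
        omega
      have hlen : PySem.Chars.len (lbits m ++ List.replicate (64 - L) '0')
          = max ((PySem.Int.bitLength ((m:Nat):Int)) : Int) 64 := by
        rw [PySem.Chars.len_eq]
        rw [← len_lbits m, ← hL]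
        simp
        omega
      rw [hlen, hlow.symm, hhigh.symm]
      simp only [Prod.mk.injEq, true_and]
      ring

-- ===== VERDICT (by name: the statement is the Claim_ definition above) =====
theorem get_bitmask_ranges_spec : Claim_equal_get_bitmask_ranges := by
  intro bd _ hpre
  unfold Spec_get_bitmask_ranges get_bitmask_ranges get_bitmask_ranges_alt
  suffices hfold : ∀ (l : List (String × String)) (st : PySem.Dict String String × Int),
      (∀ p ∈ l, 0 ≤ (PySem.Int.ofStrBase? p.2 16).getD (-1)) →
      l.foldl gbrStepA st = l.foldl gbrStepB st by
    rw [hfold _ _ hpre]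
  intro l
  induction l with
  | nil => intro st _; rfl
  | cons p t ih =>
    intro st hl
    simp only [List.foldl_cons]
    rw [step_eq st p (hl p (by simp)), ih _ (fun q hq => hl q (by simp [hq]))]
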